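-- pv_equiv track=rewrite | github.com/xa8zz/erdos-harness | erdos-872/phase4/freshness_toy.py | first_appearance_rounds
-- ===== SOURCE A (Python) =====
-- Target = tuple[int, ...]
--
-- def first_appearance_rounds(scored_targets: tuple[Target, ...]) -> dict[int, int]:
--     rounds: dict[int, int] = {}
--     for index, target in enumerate(scored_targets, start=1):
--         for point in target:
--             if point == 0:
--                 continue
--             rounds.setdefault(point, index)
--     return rounds
-- ===== SOURCE B (Python) =====
-- Target = tuple[int, ...]
--
-- def first_appearance_rounds(scored_targets: tuple[Target, ...]) -> dict[int, int]:
--     # Flatten to (round index, point) pairs, group indices per point, return each point's minimum.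
--     pairs = [(index, point)
--              for index, target in enumerate(scored_targets, start=1)
--              for point in target
--              if point != 0]
--     occurrences: dict[int, list[int]] = {}
--     for index, point in pairs:
--         occurrences.setdefault(point, []).append(index)
--     return {point: min(indices) for point, indices in occurrences.items()}
-- ===== Notes on version B (the rewrite author's own statement) =====
-- stated objective: alternative
-- what changed: B first flattens the rounds into a list of (1-based round index, nonzero point) pairs by a comprehension, groups all round indices of each point into a dict of lists, and returns {point: min(indices)}, instead of A's nested first-write-wins setdefault of a single index.
import Mathlib
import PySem

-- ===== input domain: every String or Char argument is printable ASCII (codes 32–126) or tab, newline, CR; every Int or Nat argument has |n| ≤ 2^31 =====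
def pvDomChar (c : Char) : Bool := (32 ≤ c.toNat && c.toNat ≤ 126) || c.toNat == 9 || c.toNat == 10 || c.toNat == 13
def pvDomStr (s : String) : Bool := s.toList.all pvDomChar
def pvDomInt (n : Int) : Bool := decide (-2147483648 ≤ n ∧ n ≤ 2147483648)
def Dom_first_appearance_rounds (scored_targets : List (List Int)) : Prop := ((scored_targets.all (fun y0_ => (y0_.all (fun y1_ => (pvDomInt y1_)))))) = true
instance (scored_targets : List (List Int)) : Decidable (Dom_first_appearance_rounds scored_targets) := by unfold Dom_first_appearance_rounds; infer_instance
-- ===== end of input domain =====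

-- B flattens the rounds to (index, point) pairs, groups all 1-based round indices of each nonzero point
-- into lists and returns each point's minimum, instead of A's first-write-wins setdefault of a single
-- index; alternative decomposition, same cost.


-- ===== PORT A =====
def first_appearance_rounds (scored_targets : List (List Int)) : List (Int × Int) :=
  let rounds : PySem.Dict Int Int := PySem.Dict.empty
  ((PySem.List.enumerate scored_targets 1).foldl
    (fun rounds it =>
      it.2.foldl (fun rounds point =>
        if point = 0 then rounds
        else rounds.setdefault point it.1) rounds)
    rounds).items

-- ===== PORT B =====
-- 'occurrences.setdefault(point, []).append(index)' is ported as rebinding the key to its old list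
-- (getD, default []) with the index appended: the same list value results.  'min(indices)' is
-- PySem.List.min?; every list in occurrences is nonempty by construction, so the '.getD 0' default is
-- never the result (Python's min never raises here).
def first_appearance_rounds_alt (scored_targets : List (List Int)) : List (Int × Int) :=
  let pairs : List (Int × Int) :=
    (PySem.List.enumerate scored_targets 1).flatMap
      (fun it => (it.2.filter (fun point => decide (point ≠ 0))).map (fun point => (it.1, point)))
  let occurrences : PySem.Dict Int (List Int) :=
    pairs.foldl (fun occurrences ip =>
      occurrences.insert ip.2 (occurrences.getD ip.2 [] ++ [ip.1])) PySem.Dict.empty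
  occurrences.items.map (fun pl => (pl.1, (PySem.List.min? pl.2 (fun x => x)).getD 0))

-- ===== PRECONDITION & SPEC =====
def Spec_first_appearance_rounds (scored_targets : List (List Int)) (out : List (Int × Int)) : Prop := out = first_appearance_rounds_alt scored_targets
instance (scored_targets : List (List Int)) (out : List (Int × Int)) : Decidable (Spec_first_appearance_rounds scored_targets out) := by unfold Spec_first_appearance_rounds; infer_instance

-- ===== CLAIM (what is proved, stated in full; the proofs are below) =====
def Claim_equal_first_appearance_rounds : Prop := ∀ (scored_targets : List (List Int)), Dom_first_appearance_rounds scored_targets → Spec_first_appearance_rounds scored_targets (first_appearance_rounds scored_targets)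

-- ===== LEMMAS AND PROOFS =====

-- B's flat pair list, as a function of the start index
def fvPairs (xs : List (List Int)) (s : Int) : List (Int × Int) :=
  (PySem.List.enumerate xs s).flatMap
    (fun it => (it.2.filter (fun point => decide (point ≠ 0))).map (fun point => (it.1, point)))

-- projecting B's dict-of-occurrence-lists to A's dict: key to head of its (nonempty) list
def fvProj (occ : PySem.Dict Int (List Int)) : PySem.Dict Int Int :=
  ⟨occ.items.map (fun pl => (pl.1, pl.2.headD 0))⟩

-- loop invariant for B's dict at current round index i: unique keys, and every stored list is
-- nonempty with its head minimal, all elements ≤ i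
def fvInv (occ : PySem.Dict Int (List Int)) (i : Int) : Prop :=
  occ.keys.Nodup ∧ ∀ pl ∈ occ.items, ∃ a t, pl.2 = a :: t ∧ (∀ x ∈ t, a ≤ x ∧ x ≤ i) ∧ a ≤ i

lemma fvPairs_cons (t : List Int) (ts : List (List Int)) (s : Int) :
    fvPairs (t :: ts) s
      = (t.filter (fun point => decide (point ≠ 0))).map (fun point => (s, point)) ++ fvPairs ts (s + 1) := by
  simp [fvPairs, PySem.List.enumerate_cons]

lemma fvPairs_mem (xs : List (List Int)) (s : Int) (q : Int × Int) (hq : q ∈ fvPairs xs s) :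
    s ≤ q.1 := by
  induction xs generalizing s with
  | nil => simp [fvPairs] at hq
  | cons t ts ih =>
    rw [fvPairs_cons] at hq
    rcases List.mem_append.mp hq with hq | hq
    · obtain ⟨p, _, rfl⟩ := List.mem_map.mp hq
      exact le_refl s
    · have := ih (s + 1) hq
      omega

lemma fvPairs_pairwise (xs : List (List Int)) (s : Int) :
    (fvPairs xs s).Pairwise (fun a b => a.1 ≤ b.1) := by
  induction xs generalizing s with
  | nil => simp [fvPairs]
  | cons t ts ih =>
    rw [fvPairs_cons]
    refine List.pairwise_append.mpr ⟨?_, ih (s + 1), ?_⟩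
    · refine List.pairwise_map.mpr ?_
      exact List.pairwise_of_forall (fun _ _ => le_refl s)
    · intro a ha b hb
      obtain ⟨p, _, rfl⟩ := List.mem_map.mp ha
      have := fvPairs_mem ts (s + 1) b hb
      omega

lemma fvInv_mono {occ : PySem.Dict Int (List Int)} {i j : Int} (hij : i ≤ j) (h : fvInv occ i) :
    fvInv occ j := by
  obtain ⟨hnd, hlists⟩ := h
  refine ⟨hnd, fun pl hpl => ?_⟩
  obtain ⟨a, t, he, ht, ha⟩ := hlists pl hpl
  exact ⟨a, t, he, fun x hx => ⟨(ht x hx).1, le_trans (ht x hx).2 hij⟩, le_trans ha hij⟩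

lemma fvContains (occ : PySem.Dict Int (List Int)) (p : Int) :
    (fvProj occ).contains p = occ.contains p := by
  simp only [fvProj, PySem.Dict.contains, List.any_map]
  rfl

lemma fvMinHead (a : Int) (t : List Int) (h : ∀ x ∈ t, a ≤ x) :
    PySem.List.min? (a :: t) (fun x => x) = some a := by
  unfold PySem.List.min?
  rw [List.foldl_cons]
  induction t with
  | nil => rfl
  | cons x xs ih =>
    rw [List.foldl_cons]
    have hx : ¬ (x < a) := not_lt.mpr (h x (by simp))
    simpa [hx] using ih (fun y hy => h y (by simp [hy]))

-- one pair step: A's setdefault keeps its dict exactly when B appends to an existing list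
lemma fvStep (i p : Int) (occ : PySem.Dict Int (List Int)) (h : fvInv occ i) :
    (fvProj occ).setdefault p i = fvProj (occ.insert p (occ.getD p [] ++ [i]))
    ∧ fvInv (occ.insert p (occ.getD p [] ++ [i])) i := by
  obtain ⟨hnd, hlists⟩ := h
  by_cases hc : occ.contains p = true
  · -- key already present: A keeps its dict, B appends i to the existing (nonempty) list
    have hcp : (fvProj occ).contains p = true := by rw [fvContains]; exact hc
    refine ⟨?_, ?_⟩
    · rw [PySem.Dict.setdefault_of_contains _ _ hcp]
      unfold PySem.Dict.insert
      rw [if_pos hc]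
      simp only [fvProj, List.map_map]
      congr 1
      apply List.map_congr_left
      intro q hq
      by_cases hqp : q.1 = p
      · have hmem : (p, q.2) ∈ occ.items := by rw [← hqp]; exact hq
        have hget : occ.get? p = some q.2 := PySem.Dict.get?_of_mem_items _ hmem hnd
        obtain ⟨a, t, he, _, _⟩ := hlists q hq
        simp [hqp, PySem.Dict.getD, hget, he]
      · simp [hqp]
    · constructor
      · rw [PySem.Dict.keys_insert_of_contains _ _ hc]; exact hnd
      · intro pl hpl
        unfold PySem.Dict.insert at hpl
        rw [if_pos hc] at hpl
        simp only [List.mem_map] at hpl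
        obtain ⟨q, hq, rfl⟩ := hpl
        by_cases hqp : q.1 = p
        · have hmem : (p, q.2) ∈ occ.items := by rw [← hqp]; exact hq
          have hget : occ.get? p = some q.2 := PySem.Dict.get?_of_mem_items _ hmem hnd
          obtain ⟨a, t, he, ht, ha⟩ := hlists q hq
          refine ⟨a, t ++ [i], ?_, ?_, ha⟩
          · simp [hqp, PySem.Dict.getD, hget, he]
          · intro x hx
            rcases List.mem_append.mp hx with hx | hx
            · exact ht x hx
            · simp only [List.mem_singleton] at hx
              omega
        · have hb : (q.1 == p) = false := by simpa using hqp
          simp only [hb, Bool.false_eq_true, if_false]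
          exact hlists q hq
  · -- new key: both append at the end
    have hcp : (fvProj occ).contains p = false := by rw [fvContains]; simpa using hc
    have hget : occ.get? p = none := by
      rw [PySem.Dict.get?_eq_none_iff_contains]
      simpa using hc
    refine ⟨?_, ?_⟩
    · unfold PySem.Dict.setdefault PySem.Dict.insert
      rw [if_neg (by simp [hcp]), if_neg hc]
      simp [fvProj, PySem.Dict.getD, hget]
    · constructor
      · rw [PySem.Dict.keys_insert_of_not_contains _ _ (by simpa using hc)]
        have hpk : p ∉ occ.keys := by
          intro hmem
          have hct := (PySem.Dict.contains_iff_mem_keys occ p).mpr hmem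
          exact hc hct
        simp only [List.nodup_append]
        refine ⟨hnd, List.nodup_singleton p, ?_⟩
        intro a hma b hmb
        rw [List.mem_singleton.mp hmb]
        intro hab
        exact hpk (hab ▸ hma)
      · intro pl hpl
        unfold PySem.Dict.insert at hpl
        rw [if_neg (by simp [hc])] at hpl
        rcases List.mem_append.mp hpl with hpl | hpl
        · exact hlists pl hpl
        · simp only [List.mem_singleton] at hpl
          subst hpl
          refine ⟨i, [], ?_, by simp, le_refl i⟩
          simp [PySem.Dict.getD, hget]

-- A's nested loop, rephrased as a single fold over the flat (index, point) pair list
lemma fvAconv (xs : List (List Int)) (s : Int) (d : PySem.Dict Int Int) :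
    (PySem.List.enumerate xs s).foldl
        (fun d it => it.2.foldl (fun d point => if point = 0 then d else d.setdefault point it.1) d) d
      = (fvPairs xs s).foldl (fun d ip => d.setdefault ip.2 ip.1) d := by
  induction xs generalizing s d with
  | nil => simp [fvPairs]
  | cons t ts ih =>
    rw [PySem.List.enumerate_cons, List.foldl_cons, fvPairs_cons, List.foldl_append, ← ih]
    congr 1
    have hcongr := PySem.List.foldl_congr_mem
      (l := t) (init := d)
      (f := fun d point => if point = 0 then d else d.setdefault point s)
      (g := fun d point => if point ≠ 0 then d.setdefault point s else d)
      (by intro acc x _; by_cases hx : x = 0 <;> simp [hx])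
    rw [hcongr, PySem.List.foldl_ite_eq_foldl_filter, List.foldl_map]

-- both folds over the flat pair list agree (B's dict projected to its heads), and the invariant holds
lemma fvFold (pairs : List (Int × Int)) (occ : PySem.Dict Int (List Int)) (i : Int)
    (hinv : fvInv occ i) (hlb : ∀ q ∈ pairs, i ≤ q.1)
    (hpw : pairs.Pairwise (fun a b => a.1 ≤ b.1)) :
    pairs.foldl (fun d ip => d.setdefault ip.2 ip.1) (fvProj occ)
      = fvProj (pairs.foldl (fun o ip => o.insert ip.2 (o.getD ip.2 [] ++ [ip.1])) occ)
    ∧ ∃ j, fvInv (pairs.foldl (fun o ip => o.insert ip.2 (o.getD ip.2 [] ++ [ip.1])) occ) j := by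
  induction pairs generalizing occ i with
  | nil => exact ⟨rfl, i, hinv⟩
  | cons q qs ih =>
    have hinv' : fvInv occ q.1 := fvInv_mono (hlb q (by simp)) hinv
    obtain ⟨he, hinv2⟩ := fvStep q.1 q.2 occ hinv'
    rw [List.foldl_cons, List.foldl_cons, he]
    exact ih _ q.1 hinv2 (fun r hr => (List.pairwise_cons.mp hpw).1 r hr) (List.pairwise_cons.mp hpw).2

-- ===== VERDICT (by name: the statement is the Claim_ definition above) =====
theorem first_appearance_rounds_spec : Claim_equal_first_appearance_rounds := by
  intro xs _
  unfold Spec_first_appearance_rounds first_appearance_rounds first_appearance_rounds_alt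
  simp only []
  have hinv0 : fvInv PySem.Dict.empty 1 := by
    constructor
    · simp [PySem.Dict.empty, PySem.Dict.keys]
    · intro pl hpl; simp [PySem.Dict.empty] at hpl
  have h01 : (PySem.Dict.empty : PySem.Dict Int Int) = fvProj PySem.Dict.empty := by
    simp [fvProj, PySem.Dict.empty]
  obtain ⟨he, j, hinv⟩ := fvFold (fvPairs xs 1) PySem.Dict.empty 1 hinv0
    (fun q hq => fvPairs_mem xs 1 q hq) (fvPairs_pairwise xs 1)
  rw [h01, fvAconv, he]
  obtain ⟨hnd, hlists⟩ := hinv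
  simp only [fvProj]
  apply List.map_congr_left
  intro pl hpl
  obtain ⟨a, t, hpe, ht, _⟩ := hlists pl hpl
  rw [hpe, fvMinHead a t (fun x hx => (ht x hx).1)]
  rfl
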